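-- pv_equiv track=rewrite | github.com/lroolle/CodingInPython | utils/table_render.py | table_render
-- ===== SOURCE A (Python) =====
-- def table_render(data, style=None):
--     """
--     :param style: border style or sth
--     :type data: list
--     :return: table div
--     """
--     style = style if style else 'border:1px solid #ccc'
--     td_size = len(data[0])
--     tr_tpl = '<tr>{}</tr>'
--     th_tpl = tr_tpl.format('<th style="text-align:center;min-width:80px;'
--                            '{style}">{}''</th>' * td_size)
--     td_tpl = tr_tpl.format('<td style="{style}">{}</td>' * td_size)
--     table_tpl = '<div><table style="border-collapse: collapse;">' \
--                 '{header}{content}</table></div>'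
--
--     table = table_tpl.format(
--         header=th_tpl.format(*data[0], style=style),
--         content=''.join([td_tpl.format(*values, style=style)
--                          for values in data[1:]]),
--     )
--     return table
-- ===== SOURCE B (Python) =====
-- def table_render(data, style=None):
--     """
--     :param style: border style or sth
--     :type data: list
--     :return: table div
--     """
--     style = style if style else 'border:1px solid #ccc'
--     td_size = len(data[0])
--     header = '<tr>' + ''.join(
--         '<th style="text-align:center;min-width:80px;' + style + '">' + str(v) + '</th>'
--         for v in data[0]) + '</tr>'
--     body = ''.join(
--         '<tr>' + ''.join('<td style="' + style + '">' + str(row[i]) + '</td>'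
--                          for i in range(td_size)) + '</tr>'
--         for row in data[1:])
--     return ('<div><table style="border-collapse: collapse;">'
--             + header + body + '</table></div>')
-- ===== Notes on version B (the rewrite author's own statement) =====
-- stated objective: idiomatic
-- what changed: B drops A's template-string multiplication and two-stage str.format substitution, building the header by a direct loop over data[0]'s cells and each body row by indexing i in range(td_size), concatenating the HTML pieces directly.
import Mathlib
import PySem

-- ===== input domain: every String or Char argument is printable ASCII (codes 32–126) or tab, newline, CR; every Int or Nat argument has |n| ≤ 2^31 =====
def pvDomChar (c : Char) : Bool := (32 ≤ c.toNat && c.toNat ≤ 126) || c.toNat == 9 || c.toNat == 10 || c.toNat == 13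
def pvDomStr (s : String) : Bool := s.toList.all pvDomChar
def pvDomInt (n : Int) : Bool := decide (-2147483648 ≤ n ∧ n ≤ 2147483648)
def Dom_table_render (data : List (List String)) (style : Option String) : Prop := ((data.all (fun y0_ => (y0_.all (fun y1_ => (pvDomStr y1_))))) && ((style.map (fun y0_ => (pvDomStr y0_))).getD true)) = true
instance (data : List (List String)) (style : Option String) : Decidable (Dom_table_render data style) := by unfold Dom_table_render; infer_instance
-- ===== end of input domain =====

-- B replaces A's template-multiplication + str.format machinery by direct loops over the
-- header cells and over range(td_size) per body row (objective: idiomatic/alternative; same cost).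

-- ===== PORT A =====
-- Hand port of str.format for the templates A builds: it scans the template characters,
-- '{}' consumes the next positional argument, '{style}' inserts the style keyword argument,
-- any other character is copied.  Exact for A's templates, which contain no other brace
-- constructs; the inserted argument strings are NOT re-scanned, as in Python.
def pvFmt : List Char → List String → String → List Char
  | [], _, _ => []
  | '{' :: '}' :: rest, args, st => (args.headD "").toList ++ pvFmt rest args.tail st
  | '{' :: 's' :: 't' :: 'y' :: 'l' :: 'e' :: '}' :: rest, args, st => st.toList ++ pvFmt rest args st
  | c :: rest, args, st => c :: pvFmt rest args st

def pvFormat (tpl : String) (args : List String) (st : String) : String :=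
  String.ofList (pvFmt tpl.toList args st)

-- Python string repetition tpl * n
def pvRepeat (s : String) (n : Nat) : String := String.join (List.replicate n s)

def pvThCell : String := "<th style=\"text-align:center;min-width:80px;{style}\">{}</th>"
def pvTdCell : String := "<td style=\"{style}\">{}</td>"

-- len(data[0]) raises IndexError on data = [] and .format raises IndexError on short rows:
-- both are excluded by Pre_table_render; headD/getD are the total stand-ins there.
def table_render (data : List (List String)) (style : Option String) : String :=
  let st := match style with
    | some s => if s = "" then "border:1px solid #ccc" else s
    | none => "border:1px solid #ccc"
  let td_size := (data.headD []).length
  let tr_tpl := "<tr>{}</tr>"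
  let th_tpl := pvFormat tr_tpl [pvRepeat pvThCell td_size] ""
  let td_tpl := pvFormat tr_tpl [pvRepeat pvTdCell td_size] ""
  let header := pvFormat th_tpl (data.headD []) st
  let content := String.join ((data.tail).map (fun row => pvFormat td_tpl row st))
  "<div><table style=\"border-collapse: collapse;\">" ++ header ++ content ++ "</table></div>"

-- ===== PORT B =====
-- row[i] raises IndexError for i ≥ len(row) (excluded by Pre_table_render); getD totalises.
def table_render_alt (data : List (List String)) (style : Option String) : String :=
  let st := match style with
    | some s => if s = "" then "border:1px solid #ccc" else s
    | none => "border:1px solid #ccc"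
  let td_size := (data.headD []).length
  let header := "<tr>" ++ String.join ((data.headD []).map (fun v =>
      "<th style=\"text-align:center;min-width:80px;" ++ st ++ "\">" ++ v ++ "</th>")) ++ "</tr>"
  let body := String.join ((data.tail).map (fun row =>
      "<tr>" ++ String.join ((List.range td_size).map (fun i =>
        "<td style=\"" ++ st ++ "\">" ++ row.getD i "" ++ "</td>")) ++ "</tr>"))
  "<div><table style=\"border-collapse: collapse;\">" ++ header ++ body ++ "</table></div>"

-- ===== PRECONDITION & SPEC =====
-- Pre_ excludes exactly the inputs where Python A raises IndexError: empty data
-- (data[0]) and body rows shorter than the header (str.format runs out of positional args).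
def Pre_table_render (data : List (List String)) (style : Option String) : Prop :=
  data ≠ [] ∧ ∀ row ∈ data.tail, (data.headD []).length ≤ row.length
instance (data : List (List String)) (style : Option String) : Decidable (Pre_table_render data style) := by unfold Pre_table_render; infer_instance

def pvWitness_table_render : List (List String) × Option String := ([["a", "b"], ["1", "2"]], some "color:red")

def Spec_table_render (data : List (List String)) (style : Option String) (out : String) : Prop := out = table_render_alt data style
instance (data : List (List String)) (style : Option String) (out : String) : Decidable (Spec_table_render data style out) := by unfold Spec_table_render; infer_instance

-- ===== CLAIM (what is proved, stated in full; the proofs are below) =====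
def Claim_equal_table_render : Prop := ∀ (data : List (List String)) (style : Option String), Dom_table_render data style → Pre_table_render data style → Spec_table_render data style (table_render data style)

-- ===== LEMMAS AND PROOFS =====

-- one th cell at the head of the template consumes one positional argument
theorem pvFmt_th_cons (v : String) (rest : List Char) (args : List String) (st : String) :
    pvFmt (pvThCell.toList ++ rest) (v :: args) st
      = ("<th style=\"text-align:center;min-width:80px;" ++ st ++ "\">" ++ v ++ "</th>").toList
        ++ pvFmt rest args st := by
  simp [pvThCell, pvFmt]

theorem pvFmt_td_cons (v : String) (rest : List Char) (args : List String) (st : String) :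
    pvFmt (pvTdCell.toList ++ rest) (v :: args) st
      = ("<td style=\"" ++ st ++ "\">" ++ v ++ "</td>").toList ++ pvFmt rest args st := by
  simp [pvTdCell, pvFmt]

theorem pvRepeat_succ (s : String) (n : Nat) :
    (pvRepeat s (n + 1)).toList = s.toList ++ (pvRepeat s n).toList := by
  simp [pvRepeat, List.replicate_succ, String.toList_join]

theorem pvFmt_rep_th (vs : List String) (rest : List Char) (args' : List String) (st : String) :
    pvFmt ((pvRepeat pvThCell vs.length).toList ++ rest) (vs ++ args') st
      = (String.join (vs.map (fun v =>
          "<th style=\"text-align:center;min-width:80px;" ++ st ++ "\">" ++ v ++ "</th>"))).toList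
        ++ pvFmt rest args' st := by
  induction vs with
  | nil => simp [pvRepeat, String.toList_join]
  | cons v vs ih =>
      rw [List.length_cons, pvRepeat_succ, List.append_assoc, List.cons_append, pvFmt_th_cons, ih]
      simp [String.toList_join]

theorem pvFmt_rep_td (n : Nat) (row : List String) (rest : List Char) (st : String)
    (h : n ≤ row.length) :
    pvFmt ((pvRepeat pvTdCell n).toList ++ rest) row st
      = (String.join ((List.range n).map (fun i =>
          "<td style=\"" ++ st ++ "\">" ++ row.getD i "" ++ "</td>"))).toList
        ++ pvFmt rest (row.drop n) st := by
  induction n generalizing row with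
  | zero => simp [pvRepeat, String.toList_join]
  | succ n ih =>
      cases row with
      | nil => simp at h
      | cons v row =>
        have h' : n ≤ row.length := by simpa using h
        rw [pvRepeat_succ, List.append_assoc, pvFmt_td_cons, ih row h', List.range_succ_eq_map]
        simp [String.toList_join, List.map_map, Function.comp_def]

-- formatting "<tr>{}</tr>" with one argument wraps it
theorem pvFmt_tr (X : String) (args' : List String) (st : String) :
    pvFmt ("<tr>{}</tr>").toList (X :: args') st = ("<tr>" ++ X ++ "</tr>").toList := by
  simp [pvFmt]

-- ===== VERDICT (by name: the statement is the Claim_ definition above) =====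
theorem headerA_eq (vs : List String) (st : String) :
    pvFormat (pvFormat "<tr>{}</tr>" [pvRepeat pvThCell vs.length] "") vs st
      = "<tr>" ++ String.join (vs.map (fun v =>
          "<th style=\"text-align:center;min-width:80px;" ++ st ++ "\">" ++ v ++ "</th>")) ++ "</tr>" := by
  apply String.toList_inj.mp
  unfold pvFormat
  rw [String.toList_ofList, pvFmt_tr, String.toList_ofList]
  have h := pvFmt_rep_th vs ['<','/','t','r','>'] [] st
  simp only [List.append_nil] at h
  simp [pvFmt, h]

theorem rowA_eq (n : Nat) (row : List String) (st : String) (h : n ≤ row.length) :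
    pvFormat (pvFormat "<tr>{}</tr>" [pvRepeat pvTdCell n] "") row st
      = "<tr>" ++ String.join ((List.range n).map (fun i =>
          "<td style=\"" ++ st ++ "\">" ++ row.getD i "" ++ "</td>")) ++ "</tr>" := by
  apply String.toList_inj.mp
  unfold pvFormat
  rw [String.toList_ofList, pvFmt_tr, String.toList_ofList]
  have h2 := pvFmt_rep_td n row ['<','/','t','r','>'] st h
  simp [pvFmt, h2]

theorem table_render_spec : Claim_equal_table_render := by
  intro data style _ hpre
  obtain ⟨hne, hrows⟩ := hpre
  cases data with
  | nil => exact absurd rfl hne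
  | cons hd tl =>
    unfold Spec_table_render table_render table_render_alt
    simp only [List.headD_cons, List.tail_cons]
    generalize (match style with
      | some s => if s = "" then "border:1px solid #ccc" else s
      | none => "border:1px solid #ccc") = st
    have hcont := List.map_congr_left (l := tl)
      (fun row hr => rowA_eq hd.length row st (hrows row (by simpa using hr)))
    rw [headerA_eq, hcont]
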